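-- pv_equiv track=rewrite | github.com/aiunibs/planGPT | scripts/parse_problem.py | parse_problem_satellite
-- ===== SOURCE A (Python) =====
-- def parse_problem_satellite(initial_state, goal_state, actions):
--     changing_list = {
--         "power_avail": "power-avail",
--         "calibration_target": "calibration-target",
--         "on_board": "on-board",
--         "have_image": "have-image",
--     }
--     import re
--     for i,init_state in enumerate(initial_state):
--        for key, value in changing_list.items():
--             initial_state[i] = initial_state[i].replace(key, value)
--     for i, goal in enumerate(goal_state):
--         for key, value in changing_list.items():
--             goal_state[i] = goal_state[i].replace(key, value)
--     return (initial_state, goal_state, actions)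
-- ===== SOURCE B (Python) =====
-- import re
--
-- def parse_problem_satellite(initial_state, goal_state, actions):
--     mapping = {
--         "power_avail": "power-avail",
--         "calibration_target": "calibration-target",
--         "on_board": "on-board",
--         "have_image": "have-image",
--     }
--     pattern = re.compile("|".join(map(re.escape, mapping)))
--     repl = lambda m: mapping[m.group(0)]
--     for i, s in enumerate(initial_state):
--         initial_state[i] = pattern.sub(repl, s)
--     for i, s in enumerate(goal_state):
--         goal_state[i] = pattern.sub(repl, s)
--     return (initial_state, goal_state, actions)
-- ===== Notes on version B (the rewrite author's own statement) =====
-- stated objective: idiomatic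
-- what changed: Replaces the four sequential str.replace passes per string with one precompiled regex alternation over the four predicate names, rewriting each string in a single left-to-right scan via pattern.sub with a dict-lookup callback.
import Mathlib
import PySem

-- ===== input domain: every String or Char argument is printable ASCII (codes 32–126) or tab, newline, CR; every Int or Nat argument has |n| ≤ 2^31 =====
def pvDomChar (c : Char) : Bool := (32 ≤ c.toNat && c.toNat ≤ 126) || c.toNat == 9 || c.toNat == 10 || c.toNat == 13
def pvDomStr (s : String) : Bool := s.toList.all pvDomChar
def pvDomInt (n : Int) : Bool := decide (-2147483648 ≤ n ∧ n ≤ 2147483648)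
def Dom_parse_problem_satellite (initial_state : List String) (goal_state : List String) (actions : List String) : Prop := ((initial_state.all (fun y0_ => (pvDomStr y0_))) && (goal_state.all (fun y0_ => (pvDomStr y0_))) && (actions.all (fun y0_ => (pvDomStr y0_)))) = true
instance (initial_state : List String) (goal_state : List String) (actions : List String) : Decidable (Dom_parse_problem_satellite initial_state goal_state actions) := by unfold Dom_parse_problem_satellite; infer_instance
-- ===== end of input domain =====

-- B replaces A's four sequential str.replace passes per string by ONE precompiled
-- regex alternation over the four predicate names, rewritten in a single
-- left-to-right scan. A mutates its list arguments in place (B does the same);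
-- the equivalence proved here is about the RETURN value.

-- ===== PORT A =====
def pvChangingList : List (String × String) :=
  [("power_avail", "power-avail"), ("calibration_target", "calibration-target"),
   ("on_board", "on-board"), ("have_image", "have-image")]

-- the inner `for key, value in changing_list.items(): s = s.replace(key, value)` loop
def pvANorm (s : String) : String :=
  pvChangingList.foldl (fun acc kv => PySem.Str.replace acc kv.1 kv.2) s

def parse_problem_satellite (initial_state : List String) (goal_state : List String) (actions : List String) : List String × List String × List String :=
  (initial_state.map pvANorm, goal_state.map pvANorm, actions)

-- ===== PORT B =====
def pvK1 : List Char := "power_avail".toList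
def pvV1 : List Char := "power-avail".toList
def pvK2 : List Char := "calibration_target".toList
def pvV2 : List Char := "calibration-target".toList
def pvK3 : List Char := "on_board".toList
def pvV3 : List Char := "on-board".toList
def pvK4 : List Char := "have_image".toList
def pvV4 : List Char := "have-image".toList

-- hand port of `pattern.sub(lambda m: mapping[m.group(0)], s)` where pattern is the
-- alternation of the four literal keys: exact, because re.sub takes the leftmost
-- match and, at equal positions, the first alternative, then resumes after the
-- match — precisely this single left-to-right scan.
-- (`t.drop (k.length - 1)` is `(c :: t).drop k.length` for the nonempty literal keys.)
def pvScan : List Char → List Char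
  | [] => []
  | c :: t =>
    if pvK1.isPrefixOf (c :: t) then pvV1 ++ pvScan (t.drop (pvK1.length - 1))
    else if pvK2.isPrefixOf (c :: t) then pvV2 ++ pvScan (t.drop (pvK2.length - 1))
    else if pvK3.isPrefixOf (c :: t) then pvV3 ++ pvScan (t.drop (pvK3.length - 1))
    else if pvK4.isPrefixOf (c :: t) then pvV4 ++ pvScan (t.drop (pvK4.length - 1))
    else c :: pvScan t
  termination_by l => l.length
  decreasing_by all_goals (simp only [List.length_drop, List.length_cons]; omega)

def pvBNorm (s : String) : String := String.ofList (pvScan s.toList)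

def parse_problem_satellite_alt (initial_state : List String) (goal_state : List String) (actions : List String) : List String × List String × List String :=
  (initial_state.map pvBNorm, goal_state.map pvBNorm, actions)

-- ===== PRECONDITION & SPEC =====
def Spec_parse_problem_satellite (initial_state : List String) (goal_state : List String) (actions : List String) (out : List String × List String × List String) : Prop := out = parse_problem_satellite_alt initial_state goal_state actions
instance (initial_state : List String) (goal_state : List String) (actions : List String) (out : List String × List String × List String) : Decidable (Spec_parse_problem_satellite initial_state goal_state actions out) := by unfold Spec_parse_problem_satellite; infer_instance

-- ===== CLAIM (what is proved, stated in full; the proofs are below) =====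
def Claim_equal_parse_problem_satellite : Prop := ∀ (initial_state : List String) (goal_state : List String) (actions : List String), Dom_parse_problem_satellite initial_state goal_state actions → Spec_parse_problem_satellite initial_state goal_state actions (parse_problem_satellite initial_state goal_state actions)

-- ===== LEMMAS AND PROOFS =====

-- Python str.replace (for a nonempty pattern) as a clean structural recursion.
def pvRep (old new : List Char) : List Char → List Char
  | [] => []
  | c :: t =>
    if old.isPrefixOf (c :: t) then new ++ pvRep old new (t.drop (old.length - 1))
    else c :: pvRep old new t
  termination_by l => l.length
  decreasing_by all_goals (simp only [List.length_drop, List.length_cons]; omega)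

-- `a` and `b` never collide: no nonempty suffix of `a` is a prefix of `b` nor has `b` as a prefix
def pvSafeP (a b : List Char) : Prop :=
  ∀ s : List Char, s <:+ a → s ≠ [] → ¬ s <+: b ∧ ¬ b <+: s

def pvSafeB (a b : List Char) : Bool :=
  a.tails.all (fun s => s.isEmpty || (!(s.isPrefixOf b) && !(b.isPrefixOf s)))

theorem pvSafeB_spec (a b : List Char) (h : pvSafeB a b = true) : pvSafeP a b := by
  intro s hs hne
  have hmem : (s.isEmpty || (!(s.isPrefixOf b) && !(b.isPrefixOf s))) = true :=
    List.all_eq_true.mp h s (by simpa [List.mem_tails] using hs)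
  exact ⟨fun hp => hne (by simpa [List.isPrefixOf_iff_prefix.mpr hp] using hmem),
         fun hp => hne (by simpa [List.isPrefixOf_iff_prefix.mpr hp] using hmem)⟩

theorem pv_not_prefix_append {s b x : List Char} (h1 : ¬ s <+: b) (h2 : ¬ b <+: s) :
    ¬ b <+: s ++ x := by
  intro h
  rcases Nat.le_total b.length s.length with hle | hle
  · exact h2 (by
      have := List.prefix_iff_eq_take.mp h
      rw [List.take_append_of_le_length hle] at this
      exact this ▸ List.take_prefix _ _)
  · rcases h with ⟨r, hr⟩
    apply h1
    have : s = b.take s.length := by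
      have := congrArg (List.take s.length) hr
      simpa [List.take_append_of_le_length hle, List.take_left'] using this.symm
    exact this ▸ List.take_prefix _ _

theorem pvSafeP_tail {a b : List Char} (h : pvSafeP a b) {a' : List Char} (ha : a' <:+ a) :
    pvSafeP a' b := fun s hs hne => h s (hs.trans ha) hne

-- a safe block passes unchanged through pvRep
theorem pv_walk {k v w : List Char} (h : pvSafeP w k) :
    ∀ x, pvRep k v (w ++ x) = w ++ pvRep k v x := by
  induction w with
  | nil => intro x; simp
  | cons c w' ih =>
    intro x
    have hw := h (c :: w') List.suffix_rfl (by simp)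
    have hnp : ¬ k.isPrefixOf ((c :: w') ++ x) := by
      rw [List.isPrefixOf_iff_prefix]
      exact pv_not_prefix_append hw.1 hw.2
    rw [show ((c :: w') ++ x) = c :: (w' ++ x) by simp, pvRep, if_neg (by simpa using hnp)]
    simp [ih (pvSafeP_tail h (List.suffix_cons _ _)) x]

-- pvRep creates no new occurrence of any nonempty suffix d of K (when K's suffixes are safe w.r.t. v)
theorem pv_noNew {k v K : List Char} (hs : pvSafeP K v) :
    ∀ t d, d <:+ K → d ≠ [] → ¬ d <+: t → ¬ d <+: pvRep k v t := by
  intro t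
  induction t with
  | nil => intro d _ hne _; simp [pvRep, List.prefix_nil, hne]
  | cons c t' ih =>
    intro d hdK hne hnt
    by_cases hp : k.isPrefixOf (c :: t')
    · rw [pvRep, if_pos hp]
      have hd := hs d hdK hne
      exact pv_not_prefix_append hd.2 hd.1
    · rw [pvRep, if_neg hp]
      intro hpre
      rcases d with _ | ⟨d0, d'⟩
      · exact hne rfl
      · have hd0 : d0 = c := by
          rcases hpre with ⟨r, hr⟩; simp at hr; exact hr.1
        subst hd0
        have hd' : d' <+: pvRep k v t' := by
          rcases hpre with ⟨r, hr⟩; simp at hr; exact ⟨r, hr⟩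
        rcases eq_or_ne d' [] with h | h
        · subst h; exact hnt ⟨t', rfl⟩
        · refine ih d' ((List.suffix_cons _ _).trans hdK) h ?_ hd'
          rintro ⟨r, hr⟩
          exact hnt ⟨r, by simp [hr]⟩

-- unfolding helpers for pvRep
theorem pvRep_cons_neg (k v : List Char) (c : Char) (t : List Char)
    (h : ¬ k.isPrefixOf (c :: t)) : pvRep k v (c :: t) = c :: pvRep k v t := by
  rw [pvRep, if_neg h]

theorem pvRep_matched (k v x : List Char) (hk : k ≠ []) :
    pvRep k v (k ++ x) = v ++ pvRep k v x := by
  rcases k with _ | ⟨c, kt⟩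
  · exact absurd rfl hk
  · rw [List.cons_append, pvRep,
      if_pos (List.isPrefixOf_iff_prefix.mpr ⟨x, by simp⟩)]
    simp

theorem pv_drop_head (k : List Char) (c : Char) (t x : List Char) (hk : k ≠ [])
    (hx : k ++ x = c :: t) : t.drop (k.length - 1) = x := by
  rcases k with _ | ⟨a, k'⟩
  · exact absurd rfl hk
  · simp only [List.cons_append, List.cons.injEq] at hx
    rw [← hx.2]
    simp

-- a key that did not match at the head still does not match after inner rewrites
theorem pv_head_keep {K : List Char} (hK : K ≠ []) {c : Char} {t z : List Char}
    (hnt : ¬ K <+: c :: t)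
    (hz : ∀ d, d <:+ K → d ≠ [] → ¬ d <+: t → ¬ d <+: z) : ¬ K <+: c :: z := by
  intro hp
  rcases K with _ | ⟨a, tl⟩
  · exact hK rfl
  obtain ⟨r, hr⟩ := hp
  simp only [List.cons_append, List.cons.injEq] at hr
  rcases eq_or_ne tl [] with h | h
  · subst h
    exact hnt ⟨t, by simp [hr.1]⟩
  · refine hz tl (List.suffix_cons a tl) h (fun hpre => ?_) ⟨r, hr.2⟩
    obtain ⟨r2, hr2⟩ := hpre
    exact hnt ⟨r2, by simp [hr.1, hr2]⟩

-- main fusion: the four sequential replaces equal the single scan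
theorem pv_fuse : ∀ n l, l.length ≤ n →
    pvRep pvK4 pvV4 (pvRep pvK3 pvV3 (pvRep pvK2 pvV2 (pvRep pvK1 pvV1 l))) = pvScan l := by
  have S21 : pvSafeP pvK2 pvK1 := pvSafeB_spec _ _ (by decide)
  have S31 : pvSafeP pvK3 pvK1 := pvSafeB_spec _ _ (by decide)
  have S32 : pvSafeP pvK3 pvK2 := pvSafeB_spec _ _ (by decide)
  have S41 : pvSafeP pvK4 pvK1 := pvSafeB_spec _ _ (by decide)
  have S42 : pvSafeP pvK4 pvK2 := pvSafeB_spec _ _ (by decide)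
  have S43 : pvSafeP pvK4 pvK3 := pvSafeB_spec _ _ (by decide)
  have T12 : pvSafeP pvV1 pvK2 := pvSafeB_spec _ _ (by decide)
  have T13 : pvSafeP pvV1 pvK3 := pvSafeB_spec _ _ (by decide)
  have T14 : pvSafeP pvV1 pvK4 := pvSafeB_spec _ _ (by decide)
  have T23 : pvSafeP pvV2 pvK3 := pvSafeB_spec _ _ (by decide)
  have T24 : pvSafeP pvV2 pvK4 := pvSafeB_spec _ _ (by decide)
  have T34 : pvSafeP pvV3 pvK4 := pvSafeB_spec _ _ (by decide)
  have N21 : pvSafeP pvK2 pvV1 := pvSafeB_spec _ _ (by decide)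
  have N31 : pvSafeP pvK3 pvV1 := pvSafeB_spec _ _ (by decide)
  have N32 : pvSafeP pvK3 pvV2 := pvSafeB_spec _ _ (by decide)
  have N41 : pvSafeP pvK4 pvV1 := pvSafeB_spec _ _ (by decide)
  have N42 : pvSafeP pvK4 pvV2 := pvSafeB_spec _ _ (by decide)
  have N43 : pvSafeP pvK4 pvV3 := pvSafeB_spec _ _ (by decide)
  intro n
  induction n with
  | zero =>
    intro l hl
    have : l = [] := List.length_eq_zero_iff.mp (Nat.le_zero.mp hl)
    subst this
    simp [pvRep, pvScan]
  | succ n ih =>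
    intro l hl
    rcases l with _ | ⟨c, t⟩
    · simp [pvRep, pvScan]
    simp only [List.length_cons] at hl
    by_cases h1 : pvK1.isPrefixOf (c :: t)
    · obtain ⟨x, hx⟩ := List.isPrefixOf_iff_prefix.mp h1
      have hxlen : x.length ≤ n := by
        have hlen := congrArg List.length hx
        have h11 : pvK1.length = 11 := by decide
        simp only [List.length_append, List.length_cons, h11] at hlen
        omega
      rw [pvScan, if_pos h1, pv_drop_head pvK1 c t x (by decide) hx, ← hx,
          pvRep_matched _ _ _ (by decide), pv_walk T12, pv_walk T13, pv_walk T14,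
          ih x hxlen]
    by_cases h2 : pvK2.isPrefixOf (c :: t)
    · obtain ⟨x, hx⟩ := List.isPrefixOf_iff_prefix.mp h2
      have hxlen : x.length ≤ n := by
        have hlen := congrArg List.length hx
        have h18 : pvK2.length = 18 := by decide
        simp only [List.length_append, List.length_cons, h18] at hlen
        omega
      rw [pvScan, if_neg h1, if_pos h2, pv_drop_head pvK2 c t x (by decide) hx, ← hx,
          pv_walk S21, pvRep_matched _ _ _ (by decide), pv_walk T23, pv_walk T24,
          ih x hxlen]
    by_cases h3 : pvK3.isPrefixOf (c :: t)
    · obtain ⟨x, hx⟩ := List.isPrefixOf_iff_prefix.mp h3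
      have hxlen : x.length ≤ n := by
        have hlen := congrArg List.length hx
        have h8 : pvK3.length = 8 := by decide
        simp only [List.length_append, List.length_cons, h8] at hlen
        omega
      rw [pvScan, if_neg h1, if_neg h2, if_pos h3, pv_drop_head pvK3 c t x (by decide) hx,
          ← hx, pv_walk S31, pv_walk S32, pvRep_matched _ _ _ (by decide), pv_walk T34,
          ih x hxlen]
    by_cases h4 : pvK4.isPrefixOf (c :: t)
    · obtain ⟨x, hx⟩ := List.isPrefixOf_iff_prefix.mp h4
      have hxlen : x.length ≤ n := by
        have hlen := congrArg List.length hx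
        have h10 : pvK4.length = 10 := by decide
        simp only [List.length_append, List.length_cons, h10] at hlen
        omega
      rw [pvScan, if_neg h1, if_neg h2, if_neg h3, if_pos h4,
          pv_drop_head pvK4 c t x (by decide) hx, ← hx, pv_walk S41, pv_walk S42,
          pv_walk S43, pvRep_matched _ _ _ (by decide), ih x hxlen]
    -- no key matches at the head: every pass walks over c
    have p1 : ¬ pvK1 <+: c :: t := fun hp => h1 (List.isPrefixOf_iff_prefix.mpr hp)
    have p2 : ¬ pvK2 <+: c :: t := fun hp => h2 (List.isPrefixOf_iff_prefix.mpr hp)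
    have p3 : ¬ pvK3 <+: c :: t := fun hp => h3 (List.isPrefixOf_iff_prefix.mpr hp)
    have p4 : ¬ pvK4 <+: c :: t := fun hp => h4 (List.isPrefixOf_iff_prefix.mpr hp)
    have q2 : ¬ pvK2 <+: c :: pvRep pvK1 pvV1 t :=
      pv_head_keep (by decide) p2 (fun d hd hne hnt => pv_noNew N21 t d hd hne hnt)
    have q3 : ¬ pvK3 <+: c :: pvRep pvK2 pvV2 (pvRep pvK1 pvV1 t) :=
      pv_head_keep (by decide) p3 (fun d hd hne hnt =>
        pv_noNew N32 _ d hd hne (pv_noNew N31 t d hd hne hnt))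
    have q4 : ¬ pvK4 <+: c :: pvRep pvK3 pvV3 (pvRep pvK2 pvV2 (pvRep pvK1 pvV1 t)) :=
      pv_head_keep (by decide) p4 (fun d hd hne hnt =>
        pv_noNew N43 _ d hd hne (pv_noNew N42 _ d hd hne (pv_noNew N41 t d hd hne hnt)))
    rw [pvRep_cons_neg _ _ _ _ h1,
        pvRep_cons_neg _ _ _ _ (fun hb => q2 (List.isPrefixOf_iff_prefix.mp hb)),
        pvRep_cons_neg _ _ _ _ (fun hb => q3 (List.isPrefixOf_iff_prefix.mp hb)),
        pvRep_cons_neg _ _ _ _ (fun hb => q4 (List.isPrefixOf_iff_prefix.mp hb)),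
        pvScan, if_neg h1, if_neg h2, if_neg h3, if_neg h4, ih t (by omega)]

-- link PySem.Chars.replace to pvRep
theorem pv_go_eq (old new : List Char) (hne : old ≠ []) :
    ∀ fuel l acc, l.length ≤ fuel →
      PySem.Chars.replace.go old new fuel l acc = acc.reverse ++ pvRep old new l := by
  intro fuel
  induction fuel with
  | zero =>
    intro l acc hl
    have : l = [] := List.length_eq_zero_iff.mp (Nat.le_zero.mp hl)
    subst this; simp [PySem.Chars.replace.go, pvRep]
  | succ f ih =>
    intro l acc hl
    rcases l with _ | ⟨c, t⟩
    · simp [PySem.Chars.replace.go, pvRep]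
    · rw [PySem.Chars.replace.go]
      by_cases hp : old.isPrefixOf (c :: t)
      · rw [if_pos hp]
        have hlen : old.length ≥ 1 := by
          cases old with | nil => exact absurd rfl hne | cons _ _ => simp
        obtain ⟨m, hm⟩ : ∃ m, old.length = m + 1 := ⟨old.length - 1, by omega⟩
        have hdrop : (c :: t).drop old.length = t.drop (old.length - 1) := by
          rw [hm]; simp [List.drop_succ_cons]
        rw [ih _ _ (by simp only [List.length_drop, List.length_cons] at *; omega)]
        rw [pvRep, if_pos hp, hdrop]
        simp
      · rw [if_neg hp, ih _ _ (by simp at hl ⊢; omega), pvRep, if_neg hp]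
        simp

theorem pv_replace_eq (l old new : List Char) (hne : old ≠ []) :
    PySem.Chars.replace l old new = pvRep old new l := by
  rw [PySem.Chars.replace, if_neg (by simpa [List.isEmpty_iff] using hne)]
  simpa using pv_go_eq old new hne l.length l [] le_rfl

theorem pv_norm_eq (s : String) : pvANorm s = pvBNorm s := by
  apply String.toList_inj.mp
  show (PySem.Str.replace (PySem.Str.replace (PySem.Str.replace (PySem.Str.replace
      s "power_avail" "power-avail") "calibration_target" "calibration-target")
      "on_board" "on-board") "have_image" "have-image").toList = _
  rw [PySem.Str.toList_replace, PySem.Str.toList_replace, PySem.Str.toList_replace,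
      PySem.Str.toList_replace,
      pv_replace_eq _ _ _ (by decide), pv_replace_eq _ _ _ (by decide),
      pv_replace_eq _ _ _ (by decide), pv_replace_eq _ _ _ (by decide)]
  show pvRep pvK4 pvV4 (pvRep pvK3 pvV3 (pvRep pvK2 pvV2 (pvRep pvK1 pvV1 s.toList))) = _
  rw [pv_fuse s.toList.length s.toList le_rfl]
  exact (String.toList_ofList).symm

-- ===== VERDICT (by name: the statement is the Claim_ definition above) =====
theorem parse_problem_satellite_spec : Claim_equal_parse_problem_satellite := by
  intro i g a _
  unfold Spec_parse_problem_satellite parse_problem_satellite parse_problem_satellite_alt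
  simp [List.map_congr_left fun s _ => pv_norm_eq s]
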